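-- pv_equiv track=rewrite | github.com/ScoobyXD/VerifyBot | skills/extract_skill.py | _find_python_code_end
-- ===== SOURCE A (Python) =====
-- from typing import List, Optional, Tuple
--
-- def _find_python_code_end(lines: list) -> Optional[int]:
--     """Find where Python code logically ends.
--
--     Looks for `if __name__` guard and returns the line AFTER its block.
--     """
--     main_guard_idx = None
--     for i, line in enumerate(lines):
--         if line.strip().startswith("if __name__"):
--             main_guard_idx = i
--
--     if main_guard_idx is None:
--         return None
--
--     # Walk forward from the guard, include all indented/blank lines
--     end = main_guard_idx + 1
--     while end < len(lines):
--         stripped = lines[end].strip()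
--         if not stripped:
--             # Blank line — could be inside the block or after it
--             # Look ahead: if next non-blank line is indented, it's still in the block
--             peek = end + 1
--             while peek < len(lines) and not lines[peek].strip():
--                 peek += 1
--             if peek < len(lines) and (lines[peek].startswith(" ") or lines[peek].startswith("\t")):
--                 end = peek
--                 continue
--             else:
--                 # Blank line after the block — stop here
--                 break
--         elif lines[end].startswith(" ") or lines[end].startswith("\t"):
--             # Indented — still in the if __name__ block
--             end += 1
--         else:
--             # Non-indented, non-blank — this is after the block
--             break
--
--     return end
-- ===== SOURCE B (Python) =====
-- def _find_python_code_end(lines: list):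
--     """Find where Python code logically ends (line after the last `if __name__` block)."""
--     main_guard_idx = None
--     for i, line in enumerate(lines):
--         if line.strip().startswith("if __name__"):
--             main_guard_idx = i
--
--     if main_guard_idx is None:
--         return None
--
--     # Single flat scan: remember the index of the last line still inside the block.
--     last = main_guard_idx
--     for i in range(main_guard_idx + 1, len(lines)):
--         s = lines[i].strip()
--         if not s:
--             continue
--         if lines[i].startswith((" ", "\t")):
--             last = i
--         else:
--             break
--     return last + 1
-- ===== Notes on version B (the rewrite author's own statement) =====
-- stated objective: simpler
-- what changed: Replaced A's nested blank-line look-ahead (inner peek while-loop with jump/continue/break state on `end`) by one flat forward scan that just remembers the index of the last indented line and returns it plus one.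
import Mathlib
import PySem

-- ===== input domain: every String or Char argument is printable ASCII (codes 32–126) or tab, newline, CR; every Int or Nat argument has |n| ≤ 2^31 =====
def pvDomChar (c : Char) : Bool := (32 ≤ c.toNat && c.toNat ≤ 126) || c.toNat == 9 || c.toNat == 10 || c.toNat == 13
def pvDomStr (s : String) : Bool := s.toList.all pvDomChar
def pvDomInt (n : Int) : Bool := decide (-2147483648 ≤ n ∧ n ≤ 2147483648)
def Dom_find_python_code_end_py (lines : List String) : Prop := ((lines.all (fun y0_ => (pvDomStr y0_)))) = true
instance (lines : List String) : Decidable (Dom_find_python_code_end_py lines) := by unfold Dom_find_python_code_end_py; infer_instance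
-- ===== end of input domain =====

-- B replaces A's nested blank-line look-ahead (peek) loop by one flat scan that
-- tracks the index of the last in-block line; objective: simpler.
-- (Loops are ported as structural recursion on a fuel argument; fuel = lines.length
-- is always sufficient since every loop advances its index, so behaviour is exact.)

-- ===== PORT A =====
-- last `if __name__` guard line (foldl over enumerate, like A's first for-loop)
def pvGuardIdx (lines : List String) : Option Nat :=
  (PySem.List.enumerate lines).foldl
    (fun acc p =>
      if PySem.Str.startswith (PySem.Str.strip p.2) "if __name__" then some p.1.toNat else acc)
    none

-- A's inner `peek` while-loop: first index ≥ p whose line is non-blank (or len)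
def pvPeekA (lines : List String) (p : Nat) : Nat → Nat
  | 0 => p
  | fuel + 1 =>
    if p < lines.length then
      if PySem.Str.strip (lines.getD p "") = "" then pvPeekA lines (p + 1) fuel else p
    else p

-- A's outer while-loop on `end`
def pvWalkA (lines : List String) (e : Nat) : Nat → Nat
  | 0 => e
  | fuel + 1 =>
    if e < lines.length then
      if PySem.Str.strip (lines.getD e "") = "" then
        let p := pvPeekA lines (e + 1) fuel
        if p < lines.length ∧
            (PySem.Str.startswith (lines.getD p "") " " ∨ PySem.Str.startswith (lines.getD p "") "\t") then
          pvWalkA lines p fuel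
        else e
      else if PySem.Str.startswith (lines.getD e "") " " ∨ PySem.Str.startswith (lines.getD e "") "\t" then
        pvWalkA lines (e + 1) fuel
      else e
    else e

def find_python_code_end_py (lines : List String) : Option Int :=
  match pvGuardIdx lines with
  | none => none
  | some g => some ((pvWalkA lines (g + 1) lines.length : Int))

-- ===== PORT B =====
-- B's single flat scan, carrying `last` = index of the last in-block line seen
def pvScanB (lines : List String) (i last : Nat) : Nat → Nat
  | 0 => last
  | fuel + 1 =>
    if i < lines.length then
      if PySem.Str.strip (lines.getD i "") = "" then pvScanB lines (i + 1) last fuel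
      else if PySem.Str.startswith (lines.getD i "") " " ∨ PySem.Str.startswith (lines.getD i "") "\t" then
        pvScanB lines (i + 1) i fuel
      else last
    else last

def find_python_code_end_py_alt (lines : List String) : Option Int :=
  match pvGuardIdx lines with
  | none => none
  | some g => some ((pvScanB lines (g + 1) g lines.length : Int) + 1)

-- ===== PRECONDITION & SPEC =====
def Spec_find_python_code_end_py (lines : List String) (out : Option Int) : Prop := out = find_python_code_end_py_alt lines
instance (lines : List String) (out : Option Int) : Decidable (Spec_find_python_code_end_py lines out) := by unfold Spec_find_python_code_end_py; infer_instance

-- ===== CLAIM (what is proved, stated in full; the proofs are below) =====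
def Claim_equal_find_python_code_end_py : Prop := ∀ (lines : List String), Dom_find_python_code_end_py lines → Spec_find_python_code_end_py lines (find_python_code_end_py lines)

-- ===== LEMMAS AND PROOFS =====

theorem pvPeekA_ge (lines : List String) (fuel : Nat) :
    ∀ p, p ≤ pvPeekA lines p fuel := by
  induction fuel with
  | zero => intro p; simp [pvPeekA]
  | succ n ih =>
      intro p
      rw [pvPeekA]
      split_ifs with h1 h2
      · exact le_trans (by omega) (ih (p + 1))
      · exact le_refl _
      · exact le_refl _

theorem pvPeekA_le (lines : List String) (fuel : Nat) :
    ∀ p, p ≤ lines.length → pvPeekA lines p fuel ≤ lines.length := by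
  induction fuel with
  | zero => intro p hp; simpa [pvPeekA]
  | succ n ih =>
      intro p hp
      rw [pvPeekA]
      split_ifs with h1 h2
      · exact ih (p + 1) (by omega)
      · exact hp
      · exact hp

theorem pvPeekA_blank (lines : List String) (fuel : Nat) :
    ∀ p j, p ≤ j → j < pvPeekA lines p fuel → PySem.Str.strip (lines.getD j "") = "" := by
  induction fuel with
  | zero => intro p j h1 h2; simp [pvPeekA] at h2; omega
  | succ n ih =>
      intro p j h1 h2
      rw [pvPeekA] at h2
      split_ifs at h2 with hp hb
      · rcases Nat.eq_or_lt_of_le h1 with rfl | hlt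
        · exact hb
        · exact ih (p + 1) j hlt h2
      · omega
      · omega

theorem pvPeekA_nonblank (lines : List String) (fuel : Nat) :
    ∀ p, lines.length - p ≤ fuel → pvPeekA lines p fuel < lines.length →
    PySem.Str.strip (lines.getD (pvPeekA lines p fuel) "") ≠ "" := by
  induction fuel with
  | zero =>
      intro p hf h
      simp only [pvPeekA] at h
      exact absurd h (by omega)
  | succ n ih =>
      intro p hf h
      rw [pvPeekA] at h ⊢
      split_ifs at h ⊢ with hp hb
      · exact ih (p + 1) (by omega) h
      · exact hb
      · exact absurd h (by omega)

-- B's scan does not move `last` while crossing blank lines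
theorem pvScanB_skip (lines : List String) :
    ∀ (n i p last fuel : Nat), p - i ≤ n → i ≤ p → p ≤ lines.length → p - i ≤ fuel →
    (∀ j, i ≤ j → j < p → PySem.Str.strip (lines.getD j "") = "") →
    pvScanB lines i last fuel = pvScanB lines p last (fuel - (p - i)) := by
  intro n
  induction n with
  | zero =>
      intro i p last fuel h1 h2 _ _ _
      have : i = p := by omega
      subst this; simp
  | succ n ih =>
      intro i p last fuel h1 h2 hp hfu hb
      rcases Nat.eq_or_lt_of_le h2 with rfl | hlt
      · simp
      · have hi : i < lines.length := by omega
        have hbi : PySem.Str.strip (lines.getD i "") = "" := hb i (le_refl _) hlt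
        obtain ⟨f, rfl⟩ : ∃ f, fuel = f + 1 := ⟨fuel - 1, by omega⟩
        rw [pvScanB, if_pos hi, if_pos hbi]
        have := ih (i + 1) p last f (by omega) (by omega) hp (by omega)
          (fun j hj1 hj2 => hb j (by omega) hj2)
        rw [this]
        congr 1
        omega

-- main invariant: A's walk from e equals B's scan from e with last = e - 1, plus 1
-- (any sufficient fuels on both sides)
theorem pvWalk_eq_scan (lines : List String) :
    ∀ (n e last fuel fuel' : Nat), lines.length - e ≤ n → last + 1 = e →
    lines.length - e ≤ fuel → lines.length - e ≤ fuel' →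
    pvWalkA lines e fuel = pvScanB lines e last fuel' + 1 := by
  intro n
  induction n with
  | zero =>
      intro e last fuel fuel' h1 h2 hf hf'
      have he : ¬ e < lines.length := by omega
      cases fuel with
      | zero => cases fuel' with
        | zero => simp [pvWalkA, pvScanB]; omega
        | succ f' => rw [pvWalkA, pvScanB, if_neg he]; omega
      | succ f => cases fuel' with
        | zero => rw [pvWalkA, if_neg he, pvScanB]; omega
        | succ f' => rw [pvWalkA, if_neg he, pvScanB, if_neg he]; omega
  | succ n ih =>
      intro e last fuel fuel' h1 h2 hf hf'
      by_cases he : e < lines.length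
      · obtain ⟨f, rfl⟩ : ∃ f, fuel = f + 1 := ⟨fuel - 1, by omega⟩
        obtain ⟨f', rfl⟩ : ∃ f', fuel' = f' + 1 := ⟨fuel' - 1, by omega⟩
        by_cases hb : PySem.Str.strip (lines.getD e "") = ""
        · -- blank line: A peeks ahead
          rw [pvWalkA, if_pos he, if_pos hb]
          set p := pvPeekA lines (e + 1) f with hpdef
          have hpge : e + 1 ≤ p := pvPeekA_ge lines f (e + 1)
          have hple : p ≤ lines.length := pvPeekA_le lines f (e + 1) (by omega)
          have hskip : pvScanB lines e last (f' + 1) = pvScanB lines p last (f' + 1 - (p - e)) := by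
            apply pvScanB_skip lines (lines.length) e p last (f' + 1) (by omega) (by omega) hple (by omega)
            intro j hj1 hj2
            rcases Nat.eq_or_lt_of_le hj1 with rfl | hlt
            · exact hb
            · exact pvPeekA_blank lines f (e + 1) j hlt hj2
          by_cases hc : p < lines.length ∧
              (PySem.Str.startswith (lines.getD p "") " " ∨ PySem.Str.startswith (lines.getD p "") "\t")
          · -- next non-blank line is indented: both land at p+1 with last = p
            rw [if_pos hc]
            have hnb : PySem.Str.strip (lines.getD p "") ≠ "" :=
              pvPeekA_nonblank lines f (e + 1) (by omega) hc.1
            obtain ⟨ff, hffeq⟩ : ∃ ff, f = ff + 1 := ⟨f - 1, by omega⟩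
            obtain ⟨gg, hggeq⟩ : ∃ gg, f' + 1 - (p - e) = gg + 1 := ⟨f' - (p - e), by omega⟩
            rw [hskip, hffeq, hggeq, pvWalkA, if_pos hc.1, if_neg hnb, if_pos hc.2,
              pvScanB, if_pos hc.1, if_neg hnb, if_pos hc.2]
            exact ih (p + 1) p ff gg (by omega) rfl (by omega) (by omega)
          · -- block ends here: A returns e, B returns last = e - 1
            rw [if_neg hc, hskip]
            by_cases hpl : p < lines.length
            · have hnb : PySem.Str.strip (lines.getD p "") ≠ "" :=
                pvPeekA_nonblank lines f (e + 1) (by omega) hpl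
              have hni : ¬ (PySem.Str.startswith (lines.getD p "") " " ∨ PySem.Str.startswith (lines.getD p "") "\t") := by
                intro hcontra; exact hc ⟨hpl, hcontra⟩
              obtain ⟨gg, hggeq⟩ : ∃ gg, f' + 1 - (p - e) = gg + 1 := ⟨f' - (p - e), by omega⟩
              rw [hggeq, pvScanB, if_pos hpl, if_neg hnb, if_neg hni]
              omega
            · cases hgg : f' + 1 - (p - e) with
              | zero => rw [pvScanB]; omega
              | succ gg => rw [pvScanB, if_neg hpl]; omega
        · by_cases hi : PySem.Str.startswith (lines.getD e "") " " ∨ PySem.Str.startswith (lines.getD e "") "\t"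
          · -- indented: both advance, last becomes e
            rw [pvWalkA, if_pos he, if_neg hb, if_pos hi,
              pvScanB, if_pos he, if_neg hb, if_pos hi]
            exact ih (e + 1) e f f' (by omega) rfl (by omega) (by omega)
          · -- dedented non-blank: A returns e, B returns last
            rw [pvWalkA, if_pos he, if_neg hb, if_neg hi,
              pvScanB, if_pos he, if_neg hb, if_neg hi]
            omega
      · exact ih e last fuel fuel' (by omega) h2 hf hf'

-- ===== VERDICT (by name: the statement is the Claim_ definition above) =====
theorem find_python_code_end_py_spec : Claim_equal_find_python_code_end_py := by
  intro lines _
  unfold Spec_find_python_code_end_py find_python_code_end_py find_python_code_end_py_alt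
  cases hg : pvGuardIdx lines with
  | none => rfl
  | some g =>
      simp only [Option.some.injEq]
      have h := pvWalk_eq_scan lines (lines.length) (g + 1) g lines.length lines.length
        (by omega) rfl (by omega) (by omega)
      omega
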